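-- pv_equiv track=rewrite | github.com/jett-crowdis/mtg-commander-map | scripts/companion.py | umori
-- ===== SOURCE A (Python) =====
-- def umori(card_list, magic_cards):
--
--     nonlands = [
--         c for c in card_list if 'Land' not in magic_cards[c]['type_line']]
--     possible_card_types = ['Artifact', 'Creature', 'Land',
--                            'Enchantment', 'Planeswalker', 'Instant', 'Sorcery']
--
--     # we go through each card in the nonland card list. If at any point
--     # a card doesn't share a type with a previous card, we simply return 0
--     shared_types = possible_card_types
--     for cardname in nonlands:
--         card_info = magic_cards[cardname]
--         shared_types = [
--             card_type for card_type in shared_types if card_type in card_info['type_line']]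
--         if len(shared_types) == 0:
--             return 0
--
--     return 1
-- ===== SOURCE B (Python) =====
-- def umori(card_list, magic_cards):
--     nonlands = [
--         c for c in card_list if 'Land' not in magic_cards[c]['type_line']]
--     possible_card_types = ['Artifact', 'Creature', 'Land',
--                            'Enchantment', 'Planeswalker', 'Instant', 'Sorcery']
--     for card_type in possible_card_types:
--         if all(card_type in magic_cards[c]['type_line'] for c in nonlands):
--             return 1
--     return 0
-- ===== Notes on version B (the rewrite author's own statement) =====
-- stated objective: idiomatic
-- what changed: Transposed the nesting: instead of threading a shrinking shared-types accumulator through the cards with an early return, B loops over the 7 candidate types and returns 1 as soon as one type appears in every nonland card's type_line (an exists/forall test), 0 otherwise.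
import Mathlib
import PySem

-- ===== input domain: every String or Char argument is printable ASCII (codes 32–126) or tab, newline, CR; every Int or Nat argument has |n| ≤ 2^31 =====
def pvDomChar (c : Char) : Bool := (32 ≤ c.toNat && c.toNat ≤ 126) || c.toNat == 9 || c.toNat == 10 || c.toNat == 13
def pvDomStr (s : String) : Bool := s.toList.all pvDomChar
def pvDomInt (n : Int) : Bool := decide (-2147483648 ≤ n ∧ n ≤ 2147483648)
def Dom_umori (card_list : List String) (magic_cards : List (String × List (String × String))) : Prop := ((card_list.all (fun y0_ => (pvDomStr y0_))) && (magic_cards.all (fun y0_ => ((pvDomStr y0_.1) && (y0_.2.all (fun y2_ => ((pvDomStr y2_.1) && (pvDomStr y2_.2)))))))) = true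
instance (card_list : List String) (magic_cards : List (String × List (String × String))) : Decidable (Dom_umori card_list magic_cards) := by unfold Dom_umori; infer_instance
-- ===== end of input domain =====

-- B transposes A's nesting: types outer, cards inner; same return value. Objective: idiomatic.

-- ===== PORT A =====
-- magic_cards[c]['type_line'] (both Pythons do exactly this lookup); Pre_ guarantees it is some,
-- the .getD "" is reached only outside Pre_.
def pvTypeLine (magic_cards : List (String × List (String × String))) (c : String) : String :=
  (((PySem.Dict.mk magic_cards).get? c).bind
    (fun d => (PySem.Dict.mk d).get? "type_line")).getD ""

def pvPossibleCardTypes : List String :=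
  ["Artifact", "Creature", "Land", "Enchantment", "Planeswalker", "Instant", "Sorcery"]

-- the progressive-filtering loop of A, with its early return 0
def umoriLoop (magic_cards : List (String × List (String × String))) :
    List String → List String → Int
  | _, [] => 1
  | shared_types, cardname :: rest =>
    let shared' := shared_types.filter
      (fun card_type => PySem.Str.isIn card_type (pvTypeLine magic_cards cardname))
    if shared'.length = 0 then 0 else umoriLoop magic_cards shared' rest

def umori (card_list : List String) (magic_cards : List (String × List (String × String))) : Int :=
  let nonlands := card_list.filter (fun c => !(PySem.Str.isIn "Land" (pvTypeLine magic_cards c)))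
  umoriLoop magic_cards pvPossibleCardTypes nonlands

-- ===== PORT B =====
def umori_alt (card_list : List String) (magic_cards : List (String × List (String × String))) : Int :=
  let nonlands := card_list.filter (fun c => !(PySem.Str.isIn "Land" (pvTypeLine magic_cards c)))
  if pvPossibleCardTypes.any
      (fun card_type => nonlands.all (fun c => PySem.Str.isIn card_type (pvTypeLine magic_cards c)))
  then 1 else 0

-- ===== PRECONDITION & SPEC =====
-- Pre_ excludes exactly the inputs on which the Python raises KeyError: a card name missing from
-- magic_cards, or a card record without a 'type_line' key.
def Pre_umori (card_list : List String) (magic_cards : List (String × List (String × String))) : Prop :=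
  ∀ c ∈ card_list,
    (((PySem.Dict.mk magic_cards).get? c).bind
      (fun d => (PySem.Dict.mk d).get? "type_line")).isSome = true
instance (card_list : List String) (magic_cards : List (String × List (String × String))) : Decidable (Pre_umori card_list magic_cards) := by unfold Pre_umori; infer_instance

def pvWitness_umori : List String × (List (String × List (String × String))) :=
  (["a", "b"], [("a", [("type_line", "Legendary Creature - Ooze")]),
                ("b", [("type_line", "Creature - Bear")])])

def Spec_umori (card_list : List String) (magic_cards : List (String × List (String × String))) (out : Int) : Prop := out = umori_alt card_list magic_cards
instance (card_list : List String) (magic_cards : List (String × List (String × String))) (out : Int) : Decidable (Spec_umori card_list magic_cards out) := by unfold Spec_umori; infer_instance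

-- ===== CLAIM (what is proved, stated in full; the proofs are below) =====
def Claim_equal_umori : Prop := ∀ (card_list : List String) (magic_cards : List (String × List (String × String))), Dom_umori card_list magic_cards → Pre_umori card_list magic_cards → Spec_umori card_list magic_cards (umori card_list magic_cards)

-- ===== LEMMAS AND PROOFS =====

-- A's shrinking-accumulator loop computes the exists/forall test, for any nonempty accumulator.
lemma umoriLoop_eq (magic_cards : List (String × List (String × String)))
    (ns : List String) :
    ∀ shared : List String, shared ≠ [] →
      umoriLoop magic_cards shared ns =
        if shared.any (fun t => ns.all (fun c => PySem.Str.isIn t (pvTypeLine magic_cards c)))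
        then 1 else 0 := by
  induction ns with
  | nil =>
    intro shared hne
    simp only [umoriLoop, List.all_nil, List.any_eq_true]
    rw [if_pos]
    obtain ⟨t, ht⟩ := List.exists_mem_of_ne_nil shared hne
    exact ⟨t, ht, trivial⟩
  | cons c rest ih =>
    intro shared hne
    simp only [umoriLoop]
    by_cases h : (shared.filter (fun t => PySem.Str.isIn t (pvTypeLine magic_cards c))).length = 0
    · rw [if_pos h]
      rw [List.length_eq_zero_iff, List.filter_eq_nil_iff] at h
      have hfalse : shared.any (fun t => (c :: rest).all
          (fun c' => PySem.Str.isIn t (pvTypeLine magic_cards c'))) = false := by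
        rw [List.any_eq_false]
        intro t ht
        simp only [List.all_cons, Bool.and_eq_true, not_and]
        intro htc _
        exact absurd htc (h t ht)
      rw [hfalse, if_neg]
      exact Bool.false_ne_true
    · rw [if_neg h]
      rw [ih _ (fun he => h (by rw [he]; rfl))]
      congr 1
      rw [List.any_filter]
      simp only [List.all_cons]

theorem umori_spec_aux (card_list : List String)
    (magic_cards : List (String × List (String × String))) :
    umori card_list magic_cards = umori_alt card_list magic_cards := by
  unfold umori umori_alt
  exact umoriLoop_eq magic_cards _ pvPossibleCardTypes (by simp [pvPossibleCardTypes])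

-- ===== VERDICT (by name: the statement is the Claim_ definition above) =====
theorem umori_spec : Claim_equal_umori := by
  intro card_list magic_cards _ _
  unfold Spec_umori
  exact umori_spec_aux card_list magic_cards
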